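-- pv_equiv track=rewrite | github.com/Keyfactor/ansible-collection-keyfactor-platform | modules/keyfactor/keyfactor_certificate_store_type.py | handleSupportedOperations
-- ===== SOURCE A (Python) =====
-- def handleSupportedOperations(options):
--   options = [o.capitalize() for o in options]
--   supported_types = {
--     "Add": False,
--     "Create": False,
--     "Discovery": False,
--     "Enrollment": False,
--     "Remove": False
--   }
--   return {k:(True if k in options else v) for k,v in supported_types.items()}
-- ===== SOURCE B (Python) =====
-- def handleSupportedOperations(options):
--   supported_types = {
--     "Add": False,
--     "Create": False,
--     "Discovery": False,
--     "Enrollment": False,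
--     "Remove": False
--   }
--   for o in options:
--     key = o.capitalize()
--     if key in supported_types:
--       supported_types[key] = True
--   return supported_types
-- ===== Notes on version B (the rewrite author's own statement) =====
-- stated objective: alternative
-- what changed: B scatters: it loops once over the input options, capitalizes each, and flips the matching entry of the fixed all-False table to True, instead of A's gather that membership-tests the capitalized input list for each of the five fixed keys.
import Mathlib
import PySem

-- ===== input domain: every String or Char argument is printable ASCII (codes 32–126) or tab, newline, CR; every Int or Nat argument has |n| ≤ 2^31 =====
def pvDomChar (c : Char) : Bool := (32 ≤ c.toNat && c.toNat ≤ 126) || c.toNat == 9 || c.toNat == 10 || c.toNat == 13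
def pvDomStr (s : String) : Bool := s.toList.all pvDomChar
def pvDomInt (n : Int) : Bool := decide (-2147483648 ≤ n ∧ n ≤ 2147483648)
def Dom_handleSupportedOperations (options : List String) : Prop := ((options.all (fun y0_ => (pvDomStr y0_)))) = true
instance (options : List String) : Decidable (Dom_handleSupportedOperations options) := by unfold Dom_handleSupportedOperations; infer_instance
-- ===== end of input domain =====

-- B: same result by a single scatter pass over the input instead of A's per-key membership gather (alternative decomposition, same cost).
-- ===== PORT A =====
-- str.capitalize(): first char uppercased, rest lowercased — exact on the ASCII domain
def pyCapitalize (s : String) : String :=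
  match s.toList with
  | [] => ""
  | c :: cs => String.ofList (PySem.Chars.upperChar c :: PySem.Chars.lower cs)

def handleSupportedOperations (options : List String) : List (String × Bool) :=
  let opts := options.map pyCapitalize
  let supported_types : List (String × Bool) :=
    [("Add", false), ("Create", false), ("Discovery", false), ("Enrollment", false), ("Remove", false)]
  supported_types.map (fun kv => (kv.1, if opts.contains kv.1 then true else kv.2))

-- ===== PORT B =====
-- supported_types[key] = True for an existing key: overwrite in place
def setTrue (d : List (String × Bool)) (key : String) : List (String × Bool) :=
  d.map (fun kv => if kv.1 == key then (kv.1, true) else kv)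

-- one loop iteration: if key in supported_types: supported_types[key] = True
def stepB (d : List (String × Bool)) (o : String) : List (String × Bool) :=
  let key := pyCapitalize o
  if (d.map Prod.fst).contains key then setTrue d key else d

def handleSupportedOperations_alt (options : List String) : List (String × Bool) :=
  options.foldl stepB
    [("Add", false), ("Create", false), ("Discovery", false), ("Enrollment", false), ("Remove", false)]

-- ===== PRECONDITION & SPEC =====
def Spec_handleSupportedOperations (options : List String) (out : List (String × Bool)) : Prop := out = handleSupportedOperations_alt options
instance (options : List String) (out : List (String × Bool)) : Decidable (Spec_handleSupportedOperations options out) := by unfold Spec_handleSupportedOperations; infer_instance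

-- ===== CLAIM (what is proved, stated in full; the proofs are below) =====
def Claim_equal_handleSupportedOperations : Prop := ∀ (options : List String), Dom_handleSupportedOperations options → Spec_handleSupportedOperations options (handleSupportedOperations options)

-- ===== LEMMAS AND PROOFS =====

-- ===== VERDICT (by name: the statement is the Claim_ definition above) =====
lemma alt_inv (opts : List String) (b1 b2 b3 b4 b5 : Bool) :
    opts.foldl stepB
      [("Add", b1), ("Create", b2), ("Discovery", b3), ("Enrollment", b4), ("Remove", b5)]
    = [("Add", b1 || opts.any (fun o => pyCapitalize o == "Add")),
       ("Create", b2 || opts.any (fun o => pyCapitalize o == "Create")),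
       ("Discovery", b3 || opts.any (fun o => pyCapitalize o == "Discovery")),
       ("Enrollment", b4 || opts.any (fun o => pyCapitalize o == "Enrollment")),
       ("Remove", b5 || opts.any (fun o => pyCapitalize o == "Remove"))] := by
  induction opts generalizing b1 b2 b3 b4 b5 with
  | nil => simp
  | cons o os ih =>
    rw [List.foldl_cons]
    by_cases h1 : pyCapitalize o = "Add"
    · rw [show stepB [("Add", b1), ("Create", b2), ("Discovery", b3), ("Enrollment", b4), ("Remove", b5)] o
            = [("Add", true), ("Create", b2), ("Discovery", b3), ("Enrollment", b4), ("Remove", b5)] by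
        simp [stepB, setTrue, h1], ih]
      simp [h1]
    · by_cases h2 : pyCapitalize o = "Create"
      · rw [show stepB [("Add", b1), ("Create", b2), ("Discovery", b3), ("Enrollment", b4), ("Remove", b5)] o
              = [("Add", b1), ("Create", true), ("Discovery", b3), ("Enrollment", b4), ("Remove", b5)] by
          simp [stepB, setTrue, h2], ih]
        simp [h2]
      · by_cases h3 : pyCapitalize o = "Discovery"
        · rw [show stepB [("Add", b1), ("Create", b2), ("Discovery", b3), ("Enrollment", b4), ("Remove", b5)] o
                = [("Add", b1), ("Create", b2), ("Discovery", true), ("Enrollment", b4), ("Remove", b5)] by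
            simp [stepB, setTrue, h3], ih]
          simp [h3]
        · by_cases h4 : pyCapitalize o = "Enrollment"
          · rw [show stepB [("Add", b1), ("Create", b2), ("Discovery", b3), ("Enrollment", b4), ("Remove", b5)] o
                  = [("Add", b1), ("Create", b2), ("Discovery", b3), ("Enrollment", true), ("Remove", b5)] by
              simp [stepB, setTrue, h4], ih]
            simp [h4]
          · by_cases h5 : pyCapitalize o = "Remove"
            · rw [show stepB [("Add", b1), ("Create", b2), ("Discovery", b3), ("Enrollment", b4), ("Remove", b5)] o
                    = [("Add", b1), ("Create", b2), ("Discovery", b3), ("Enrollment", b4), ("Remove", true)] by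
                simp [stepB, setTrue, h5], ih]
              simp [h5]
            · rw [show stepB [("Add", b1), ("Create", b2), ("Discovery", b3), ("Enrollment", b4), ("Remove", b5)] o
                    = [("Add", b1), ("Create", b2), ("Discovery", b3), ("Enrollment", b4), ("Remove", b5)] by
                simp [stepB, h1, h2, h3, h4, h5], ih]
              simp [beq_eq_false_iff_ne.mpr h1, beq_eq_false_iff_ne.mpr h2, beq_eq_false_iff_ne.mpr h3,
                    beq_eq_false_iff_ne.mpr h4, beq_eq_false_iff_ne.mpr h5]

-- membership of k in the capitalized list = some element capitalizes to k
lemma contains_map_cap (options : List String) (k : String) :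
    ((options.map pyCapitalize).contains k) = options.any (fun o => pyCapitalize o == k) := by
  induction options with
  | nil => rfl
  | cons o os ih =>
    simp only [List.map_cons, List.contains_cons, List.any_cons, ih]
    rw [Bool.beq_comm]

theorem handleSupportedOperations_spec : Claim_equal_handleSupportedOperations := by
  intro options _
  unfold Spec_handleSupportedOperations handleSupportedOperations handleSupportedOperations_alt
  rw [alt_inv]
  simp only [contains_map_cap]
  simp
  refine ⟨?_, ?_, ?_, ?_, ?_⟩ <;> (rw [Bool.eq_iff_iff]; simp [List.any_eq_true])
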